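-- pv_equiv track=rewrite | github.com/xx-cy/Cryptography | crypto1/PA1 option/option.py | keyfind
-- ===== SOURCE A (Python) =====
-- import string
--
-- def keyfind(strGroup):
--     # 由题目得知明文中包含大小写字母、标点符号和空格，但不包含数字
--     possibleChars = string.ascii_letters + ',' + '.' + ' '
--     testKeys = []
--     trueKeys = []
--     for i in range(0x00, 0xFF):
--         testKeys.append(i)
--         trueKeys.append(i)
--     for i in testKeys:
--         for j in strGroup:
--             if chr(i ^ j) not in possibleChars:
--                 trueKeys.remove(i)
--                 break
--     return trueKeys
-- ===== SOURCE B (Python) =====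
-- import string
--
-- def keyfind(strGroup):
--     # Per distinct byte, filter the surviving key set; keys 0..254, output sorted.
--     allowed = {ord(c) for c in string.ascii_letters + ',' + '.' + ' '}
--     valid = set(range(0x00, 0xFF))
--     for b in set(strGroup):
--         valid = {k for k in valid if (b ^ k) in allowed}
--     return sorted(valid)
-- ===== Notes on version B (the rewrite author's own statement) =====
-- stated objective: alternative
-- what changed: Instead of testing each of the 255 keys against the whole string with list.remove, B deduplicates the input bytes once and, per distinct byte, filters the surviving key set by a hash-set membership test, sorting the survivors at the end.
-- outside the precondition, e.g. on keyfind([300]): A returns [], B returns []; on keyfind([-1]): A raises ValueError, B returns []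
import Mathlib
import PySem

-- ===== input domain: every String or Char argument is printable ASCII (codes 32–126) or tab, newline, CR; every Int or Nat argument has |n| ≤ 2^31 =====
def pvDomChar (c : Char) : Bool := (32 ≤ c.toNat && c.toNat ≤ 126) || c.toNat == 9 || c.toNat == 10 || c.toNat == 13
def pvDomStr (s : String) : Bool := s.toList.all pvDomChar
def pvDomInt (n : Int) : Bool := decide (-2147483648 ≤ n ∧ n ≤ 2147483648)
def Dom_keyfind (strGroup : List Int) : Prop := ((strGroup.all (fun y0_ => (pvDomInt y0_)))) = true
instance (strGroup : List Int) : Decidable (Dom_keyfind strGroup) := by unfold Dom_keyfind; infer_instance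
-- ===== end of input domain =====

-- B deduplicates the input bytes and filters the surviving key set per distinct byte
-- against a precomputed code set, instead of testing all 255 keys against the whole string.

-- ===== PORT A =====
-- string.ascii_letters + ',' + '.' + ' '
def pvPossibleChars : List Char :=
  "abcdefghijklmnopqrstuvwxyzABCDEFGHIJKLMNOPQRSTUVWXYZ,. ".toList

-- i ^ j (Python-exact, also on negative ints)
def pvXor (i j : Int) : Int := PySem.Int.bxor i j

-- chr(n): exact for 0 ≤ n < 0xD800, which covers every n = i ^ j reached under Pre_keyfind
def pvChr (n : Int) : Char := Char.ofNat n.toNat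

-- inner loop 'for j in strGroup: if chr(i ^ j) not in possibleChars: …; break'
-- (true = the remove/break fired for key i)
def pvBadA (i : Int) (l : List Int) : Bool :=
  match l with
  | [] => false
  | j :: rest =>
      if !(pvPossibleChars.contains (pvChr (pvXor i j))) then true else pvBadA i rest

def keyfind (strGroup : List Int) : List Int :=
  let testKeys := PySem.List.pyRange 0 255 1
  let trueKeys := testKeys
  -- 'trueKeys.remove(i)' never raises here: each i occurs in trueKeys and is removed at most once
  testKeys.foldl
    (fun tk i => if pvBadA i strGroup then (PySem.List.remove? tk i).getD tk else tk)
    trueKeys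

-- ===== PORT B =====
-- allowed = {ord(c) for c in string.ascii_letters + ',' + '.' + ' '}
def pvAllowed : PySem.Set Int :=
  PySem.Set.ofList (pvPossibleChars.map (fun c => (c.toNat : Int)))

def keyfind_alt (strGroup : List Int) : List Int :=
  let valid0 : PySem.Set Int := PySem.Set.ofList (PySem.List.pyRange 0 255 1)
  -- for b in set(strGroup): valid = {k for k in valid if (b ^ k) in allowed}
  -- (the set of bytes is consumed order-independently: only membership matters,
  --  and the function ends with sorted())
  let valid := (PySem.Set.ofList strGroup).foldl
    (fun v b => v.filter (fun k => PySem.Set.contains pvAllowed (pvXor b k))) valid0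
  PySem.List.sorted valid (fun x => x) false

-- ===== PRECONDITION & SPEC =====
-- Pre_ restricts to the task's natural domain: lists of bytes 0..255. Outside it A's
-- chr(i ^ j) can raise ValueError (e.g. any negative element); on some non-byte lists A
-- still returns the empty result because every key is eliminated before the bad element
-- is reached — an accident of scan order (B agrees there, see the cite).
def Pre_keyfind (strGroup : List Int) : Prop :=
  ∀ j ∈ strGroup, 0 ≤ j ∧ j < 256
instance (strGroup : List Int) : Decidable (Pre_keyfind strGroup) := by
  unfold Pre_keyfind; infer_instance

def pvWitness_keyfind : List Int := [104, 101, 108, 108, 111]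

def Spec_keyfind (strGroup : List Int) (out : List Int) : Prop := out = keyfind_alt strGroup
instance (strGroup : List Int) (out : List Int) : Decidable (Spec_keyfind strGroup out) := by
  unfold Spec_keyfind; infer_instance

-- ===== CLAIM (what is proved, stated in full; the proofs are below) =====
def Claim_equal_keyfind : Prop :=
  ∀ (strGroup : List Int), Dom_keyfind strGroup → Pre_keyfind strGroup →
    Spec_keyfind strGroup (keyfind strGroup)

-- ===== LEMMAS AND PROOFS =====

-- the A-side inner loop is an all-test over the string
theorem pvBadA_eq_all (i : Int) (l : List Int) :
    pvBadA i l = !(l.all (fun j => pvPossibleChars.contains (pvChr (pvXor i j)))) := by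
  induction l with
  | nil => rfl
  | cons j rest ih =>
      simp only [pvBadA, List.all_cons]
      by_cases h : pvPossibleChars.contains (pvChr (pvXor i j)) <;> simp [h, ih]

-- the remove-step ignores a head it never removes
theorem foldl_remove_cons (c : Int → Bool) (i : Int) :
    ∀ (l m : List Int), i ∉ l →
      l.foldl (fun tk x => if c x then (PySem.List.remove? tk x).getD tk else tk) (i :: m)
      = i :: l.foldl (fun tk x => if c x then (PySem.List.remove? tk x).getD tk else tk) m := by
  intro l
  induction l with
  | nil => intro m _; rfl
  | cons x t ih =>
      intro m hni
      have hxi : x ≠ i := fun h => hni (by simp [h])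
      have hstep : (if c x then (PySem.List.remove? (i :: m) x).getD (i :: m) else (i :: m))
          = i :: (if c x then (PySem.List.remove? m x).getD m else m) := by
        by_cases hcx : c x
        · rw [if_pos hcx, if_pos hcx, PySem.List.remove?_cons_of_ne m (Ne.symm hxi)]
          cases hr : PySem.List.remove? m x <;> simp [hr]
        · simp [hcx]
      simp only [List.foldl_cons]
      rw [hstep]
      exact ih _ (fun h => hni (List.mem_cons_of_mem x h))

-- folding A's remove-step over a duplicate-free list starting from itself filters it
theorem foldl_remove_filter (c : Int → Bool) :
    ∀ (l : List Int), l.Nodup →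
      l.foldl (fun tk x => if c x then (PySem.List.remove? tk x).getD tk else tk) l
      = l.filter (fun x => !(c x)) := by
  intro l
  induction l with
  | nil => intro _; rfl
  | cons x t ih =>
      intro hnd
      have hxt : x ∉ t := (List.nodup_cons.mp hnd).1
      have hndt : t.Nodup := (List.nodup_cons.mp hnd).2
      by_cases hc : c x
      · simp only [List.foldl_cons, hc, if_pos, PySem.List.remove?_cons_self, Option.getD_some,
          List.filter_cons]
        rw [ih hndt]
        simp [hc]
      · simp only [List.foldl_cons, hc, if_neg, Bool.false_eq_true, not_false_iff]
        rw [foldl_remove_cons c x t t hxt, ih hndt]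
        simp [hc]

-- folding B's per-byte filter is one filter by the conjunction of the tests
theorem foldl_filter_all (p : Int → Int → Bool) :
    ∀ (s v0 : List Int),
      s.foldl (fun v b => v.filter (fun k => p b k)) v0
      = v0.filter (fun k => s.all (fun b => p b k)) := by
  intro s
  induction s with
  | nil => intro v0; simp
  | cons b t ih =>
      intro v0
      simp only [List.foldl_cons, ih, List.filter_filter, List.all_cons]
      exact List.filter_congr (fun k _ => by simp [Bool.and_comm])

-- the character test of A agrees with the code test of B on every code chr accepts
theorem contains_code_eq (n : Nat) (h : n < 55296) :
    pvPossibleChars.contains (pvChr (Int.ofNat n))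
      = PySem.Set.contains pvAllowed (Int.ofNat n) := by
  have hval : (Char.ofNat n).toNat = n := by
    unfold Char.ofNat; rw [dif_pos (Or.inl h)]; rfl
  have hchr : pvChr (Int.ofNat n) = Char.ofNat n := by simp [pvChr]
  rw [Bool.eq_iff_iff, List.contains_iff_mem, PySem.Set.contains_iff]
  unfold pvAllowed
  rw [PySem.Set.mem_ofList, hchr]
  constructor
  · intro hm
    exact List.mem_map.mpr ⟨_, hm, by simp [hval]⟩
  · intro hm
    obtain ⟨cch, hc, hcn⟩ := List.mem_map.mp hm
    have hcn' : cch.toNat = n := by simpa using hcn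
    have hce : cch = Char.ofNat n := by rw [← hcn', Char.ofNat_toNat]
    rwa [← hce]

-- xor of a key 0..254 with a byte 0..255 stays below 512 (< 0xD800)
theorem pvXor_lt (i j : Int) (hi0 : 0 ≤ i) (hi : i < 255) (hj0 : 0 ≤ j) (hj : j < 256) :
    (i.toNat ^^^ j.toNat) < 512 := by
  have e : (2 : Nat) ^ 9 = 512 := by norm_num
  have h1 : i.toNat < 2 ^ 9 := by rw [e]; omega
  have h2 : j.toNat < 2 ^ 9 := by rw [e]; omega
  have := Nat.xor_lt_two_pow h1 h2
  rwa [e] at this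

-- the two membership tests agree pointwise on keys 0..254 and bytes 0..255
theorem pointwise_eq (i j : Int) (hi0 : 0 ≤ i) (hi : i < 255) (hj0 : 0 ≤ j) (hj : j < 256) :
    pvPossibleChars.contains (pvChr (pvXor i j))
      = PySem.Set.contains pvAllowed (pvXor j i) := by
  have hn : (i.toNat ^^^ j.toNat) < 55296 := by
    have := pvXor_lt i j hi0 hi hj0 hj; omega
  have hcomm : pvXor j i = pvXor i j := by unfold pvXor; exact PySem.Int.bxor_comm j i
  have hofn : pvXor i j = Int.ofNat (i.toNat ^^^ j.toNat) := by
    unfold pvXor; rw [PySem.Int.bxor_of_nonneg hi0 hj0]; rfl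
  rw [hcomm, hofn]
  exact contains_code_eq _ hn

-- ===== VERDICT (by name: the statement is the Claim_ definition above) =====
theorem keyfind_spec : Claim_equal_keyfind := by
  intro strGroup _hdom hpre
  unfold Spec_keyfind keyfind keyfind_alt
  simp only []
  -- A side: foldl-with-remove over a duplicate-free range = filter
  rw [foldl_remove_filter _ _ (PySem.List.nodup_pyRange_one 0 255)]
  -- B side: set(range) = range, fold of filters = one filter, sorted of an increasing list = itself
  rw [PySem.Set.ofList_eq_self_of_nodup _ (PySem.List.nodup_pyRange_one 0 255)]
  rw [foldl_filter_all]
  rw [PySem.List.sorted_eq_self_of_pairwise _ _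
    (((PySem.List.pairwise_lt_pyRange_one 0 255).filter _).imp (fun h => le_of_lt h))]
  refine List.filter_congr ?_
  intro i hi
  obtain ⟨hi0, hi255⟩ := PySem.List.mem_pyRange_one.mp hi
  rw [pvBadA_eq_all, Bool.not_not, Bool.eq_iff_iff]
  simp only [List.all_eq_true]
  constructor
  · intro h b hb
    have hbm : b ∈ strGroup := (PySem.Set.mem_ofList _ _).mp hb
    rw [← pointwise_eq i b hi0 hi255 (hpre b hbm).1 (hpre b hbm).2]
    exact h b hbm
  · intro h j hj
    rw [pointwise_eq i j hi0 hi255 (hpre j hj).1 (hpre j hj).2]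
    exact h j ((PySem.Set.mem_ofList _ _).mpr hj)
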